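-- pv_equiv track=rewrite | github.com/JeffreySanford/docker-audiocraft | workspace/utils.py | match_by_suffix
-- ===== SOURCE A (Python) =====
-- def match_by_suffix(name, sd_keys, max_suffix=6):
--     parts = name.split('.')
--     max_len = min(max_suffix, len(parts))
--     for suffix_len in range(max_len, 0, -1):
--         suffix = '.'.join(parts[-suffix_len:])
--         for key in sd_keys:
--             if key.endswith(suffix):
--                 return key
--     return None
-- ===== SOURCE B (Python) =====
-- def match_by_suffix(name, sd_keys, max_suffix=6):
--     parts = name.split('.')
--     max_len = min(max_suffix, len(parts))
--     best_len = 0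
--     best_key = None
--     for key in sd_keys:
--         key_len = 0
--         for suffix_len in range(max_len, 0, -1):
--             if key.endswith('.'.join(parts[-suffix_len:])):
--                 key_len = suffix_len
--                 break
--         if key_len > best_len:
--             best_len = key_len
--             best_key = key
--     return best_key
-- ===== Notes on version B (the rewrite author's own statement) =====
-- stated objective: alternative
-- what changed: Inverted the loop nesting: instead of iterating suffix lengths outermost and returning at the first key scan hit, B makes a single outer pass over sd_keys, computes each key's longest matching suffix length, and keeps a running strict-max best so the first key in input order wins ties.
import Mathlib
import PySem

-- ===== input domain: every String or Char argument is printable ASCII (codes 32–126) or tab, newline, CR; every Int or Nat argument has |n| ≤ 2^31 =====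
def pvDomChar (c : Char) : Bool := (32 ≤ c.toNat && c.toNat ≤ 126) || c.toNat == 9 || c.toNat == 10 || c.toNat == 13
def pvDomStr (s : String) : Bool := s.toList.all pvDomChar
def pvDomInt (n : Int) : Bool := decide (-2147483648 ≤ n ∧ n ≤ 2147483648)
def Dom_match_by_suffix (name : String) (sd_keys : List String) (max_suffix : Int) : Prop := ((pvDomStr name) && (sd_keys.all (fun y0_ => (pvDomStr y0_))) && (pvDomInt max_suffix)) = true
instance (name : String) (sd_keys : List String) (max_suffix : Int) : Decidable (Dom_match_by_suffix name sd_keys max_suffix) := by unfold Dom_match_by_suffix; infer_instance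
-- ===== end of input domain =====

-- B inverts A's loop nesting (keys outer with a running strict-max best, suffix lengths inner) instead of
-- suffix lengths outer with an early-returning inner key scan; same complexity, different traversal (objective: alternative).

-- ===== PORT A =====
-- name.split('.')  (sep is the nonempty literal '.', so split? is some; exact)
def pvParts (name : String) : List String := (PySem.Str.split? name ".").getD []

-- '.'.join(parts[-l:])
def pvSuffix (parts : List String) (l : Int) : String :=
  PySem.Str.join "." (PySem.List.slice parts (some (-l)) none)

-- inner 'for key in sd_keys: if key.endswith(suffix): return key'
def pvFindKey (suffix : String) : List String → Option String
  | [] => none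
  | k :: ks => if PySem.Str.endswith k suffix then some k else pvFindKey suffix ks

-- outer 'for suffix_len in range(max_len, 0, -1)'
def pvLoopA (parts sd_keys : List String) : List Int → Option String
  | [] => none
  | l :: ls =>
    match pvFindKey (pvSuffix parts l) sd_keys with
    | some k => some k
    | none => pvLoopA parts sd_keys ls

def match_by_suffix (name : String) (sd_keys : List String) (max_suffix : Int) : Option String :=
  let parts := pvParts name
  let max_len := min max_suffix (parts.length : Int)
  pvLoopA parts sd_keys (PySem.List.pyRange max_len 0 (-1))

-- ===== PORT B =====
-- inner 'for suffix_len in range(max_len, 0, -1): if key.endswith(...): key_len = suffix_len; break', else key_len = 0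
def pvKeyLen (parts : List String) (key : String) : List Int → Int
  | [] => 0
  | l :: ls =>
    if PySem.Str.endswith key (pvSuffix parts l) then l else pvKeyLen parts key ls

def match_by_suffix_alt (name : String) (sd_keys : List String) (max_suffix : Int) : Option String :=
  let parts := pvParts name
  let max_len := min max_suffix (parts.length : Int)
  let rng := PySem.List.pyRange max_len 0 (-1)
  (sd_keys.foldl
    (fun st key =>
      let key_len := pvKeyLen parts key rng
      if st.1 < key_len then (key_len, some key) else st)
    ((0 : Int), (none : Option String))).2

-- ===== PRECONDITION & SPEC =====
def Spec_match_by_suffix (name : String) (sd_keys : List String) (max_suffix : Int) (out : Option String) : Prop := out = match_by_suffix_alt name sd_keys max_suffix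
instance (name : String) (sd_keys : List String) (max_suffix : Int) (out : Option String) : Decidable (Spec_match_by_suffix name sd_keys max_suffix out) := by unfold Spec_match_by_suffix; infer_instance

-- ===== CLAIM (what is proved, stated in full; the proofs are below) =====
def Claim_equal_match_by_suffix : Prop := ∀ (name : String) (sd_keys : List String) (max_suffix : Int), Dom_match_by_suffix name sd_keys max_suffix → Spec_match_by_suffix name sd_keys max_suffix (match_by_suffix name sd_keys max_suffix)

-- ===== LEMMAS AND PROOFS =====

-- B's fold step, named for the lemmas (definitionally the lambda in match_by_suffix_alt)
def pvStep (parts : List String) (rng : List Int) (st : Int × Option String) (key : String) : Int × Option String :=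
  if st.1 < pvKeyLen parts key rng then (pvKeyLen parts key rng, some key) else st

theorem pvKeyLen_mem_or_zero (parts : List String) (key : String) (L : List Int) :
    pvKeyLen parts key L ∈ L ∨ pvKeyLen parts key L = 0 := by
  induction L with
  | nil => right; rfl
  | cons l ls ih =>
    simp only [pvKeyLen]
    split
    · left; exact List.mem_cons_self
    · rcases ih with h | h
      · left; exact List.mem_cons_of_mem _ h
      · right; exact h

theorem pvKeyLen_cons_pos (parts : List String) (key : String) (l : Int) (ls : List Int)
    (hk : PySem.Str.endswith key (pvSuffix parts l) = true) :
    pvKeyLen parts key (l :: ls) = l := by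
  simp only [pvKeyLen]
  rw [if_pos hk]

theorem pvKeyLen_cons_neg (parts : List String) (key : String) (l : Int) (ls : List Int)
    (hk : PySem.Str.endswith key (pvSuffix parts l) = false) :
    pvKeyLen parts key (l :: ls) = pvKeyLen parts key ls := by
  simp only [pvKeyLen]
  rw [if_neg (by rw [hk]; exact Bool.false_ne_true)]

-- once the running best is ≥ every remaining key's length, the fold no longer changes the state
theorem pvFold_const (parts : List String) (rng : List Int) (sd : List String)
    (st : Int × Option String) (hmax : ∀ k ∈ sd, pvKeyLen parts k rng ≤ st.1) :
    sd.foldl (pvStep parts rng) st = st := by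
  induction sd with
  | nil => rfl
  | cons k ks ih =>
    have hk := hmax k List.mem_cons_self
    have estep : pvStep parts rng st k = st := by
      simp only [pvStep]
      rw [if_neg (not_lt.mpr hk)]
    rw [List.foldl_cons, estep]
    exact ih (fun k' hk' => hmax k' (List.mem_cons_of_mem _ hk'))

-- if no key matches the head suffix, the head length can be dropped from every inner scan
theorem pvFold_drop (parts : List String) (l : Int) (ls : List Int) (sd : List String)
    (st : Int × Option String)
    (hnone : ∀ k ∈ sd, PySem.Str.endswith k (pvSuffix parts l) = false) :
    sd.foldl (pvStep parts (l :: ls)) st = sd.foldl (pvStep parts ls) st := by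
  induction sd generalizing st with
  | nil => simp only [List.foldl_nil]
  | cons k ks ih =>
    have hk := hnone k List.mem_cons_self
    have estep : pvStep parts (l :: ls) st k = pvStep parts ls st k := by
      simp only [pvStep, pvKeyLen_cons_neg parts k l ls hk]
    rw [List.foldl_cons, List.foldl_cons, estep]
    exact ih _ (fun k' hk' => hnone k' (List.mem_cons_of_mem _ hk'))

theorem pvFindKey_none (suffix : String) (sd : List String)
    (h : pvFindKey suffix sd = none) : ∀ k ∈ sd, PySem.Str.endswith k suffix = false := by
  induction sd with
  | nil => intro k hk; cases hk
  | cons k ks ih =>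
    intro k' hk'
    simp only [pvFindKey] at h
    by_cases he : PySem.Str.endswith k suffix = true
    · rw [if_pos he] at h; cases h
    · rw [if_neg he] at h
      rcases List.mem_cons.mp hk' with rfl | hmem
      · simpa using he
      · exact ih h k' hmem

-- A's early return at length l equals the fold's final best key, given l dominates all other lengths
set_option maxHeartbeats 1000000 in
theorem pvFold_hit (parts : List String) (l : Int) (ls : List Int) (sd : List String) (k0 : String)
    (st : Int × Option String)
    (hfind : pvFindKey (pvSuffix parts l) sd = some k0)
    (hlt : st.1 < l) (hpos : 0 < l) (hls : ∀ x ∈ ls, x < l) :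
    (sd.foldl (pvStep parts (l :: ls)) st).2 = some k0 := by
  have keylen_le : ∀ k, pvKeyLen parts k (l :: ls) ≤ l := by
    intro k
    rcases pvKeyLen_mem_or_zero parts k (l :: ls) with h | h
    · rcases List.mem_cons.mp h with h | h
      · exact le_of_eq h
      · exact le_of_lt (hls _ h)
    · rw [h]; exact le_of_lt hpos
  have keylen_lt : ∀ k, PySem.Str.endswith k (pvSuffix parts l) = false →
      pvKeyLen parts k (l :: ls) < l := by
    intro k hk
    rw [pvKeyLen_cons_neg parts k l ls hk]
    rcases pvKeyLen_mem_or_zero parts k ls with h | h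
    · exact hls _ h
    · rw [h]; exact hpos
  induction sd generalizing st with
  | nil => cases hfind
  | cons k ks ih =>
    simp only [pvFindKey] at hfind
    by_cases hk : PySem.Str.endswith k (pvSuffix parts l) = true
    · rw [if_pos hk] at hfind
      injection hfind with h; subst h
      have estep : pvStep parts (l :: ls) st k = (l, some k) := by
        simp only [pvStep, pvKeyLen_cons_pos parts k l ls hk]
        rw [if_pos hlt]
      rw [List.foldl_cons, estep,
        pvFold_const parts (l :: ls) ks (l, some k) (fun k' _ => keylen_le k')]
    · rw [if_neg hk] at hfind
      have hkf : PySem.Str.endswith k (pvSuffix parts l) = false := by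
        cases hfk : PySem.Str.endswith k (pvSuffix parts l)
        · rfl
        · exact absurd hfk hk
      have hklt := keylen_lt k hkf
      rw [List.foldl_cons]
      by_cases hup : st.1 < pvKeyLen parts k (l :: ls)
      · have estep : pvStep parts (l :: ls) st k = (pvKeyLen parts k (l :: ls), some k) := by
          simp only [pvStep]
          rw [if_pos hup]
        rw [estep]
        exact ih (pvKeyLen parts k (l :: ls), some k) hfind hklt
      · have estep : pvStep parts (l :: ls) st k = st := by
          simp only [pvStep]
          rw [if_neg hup]
        rw [estep]
        exact ih st hfind hlt

-- the heart: A's nested loops equal B's fold, for any positive strictly descending length list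
theorem pvMain (parts sd : List String) (L : List Int)
    (hpos : ∀ x ∈ L, 0 < x) (hdesc : L.Pairwise (· > ·)) :
    pvLoopA parts sd L = (sd.foldl (pvStep parts L) ((0 : Int), (none : Option String))).2 := by
  induction L with
  | nil =>
    rw [pvFold_const parts [] sd (0, none) (fun k _ => le_of_eq rfl)]
    rfl
  | cons l ls ih =>
    have hlpos : 0 < l := hpos l List.mem_cons_self
    have hls : ∀ x ∈ ls, x < l := fun x hx => (List.pairwise_cons.mp hdesc).1 x hx
    cases hfk : pvFindKey (pvSuffix parts l) sd with
    | none =>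
      rw [pvFold_drop parts l ls sd _ (pvFindKey_none _ _ hfk)]
      rw [show pvLoopA parts sd (l :: ls) = pvLoopA parts sd ls by
        simp only [pvLoopA, hfk]]
      exact ih (fun x hx => hpos x (List.mem_cons_of_mem _ hx)) (List.pairwise_cons.mp hdesc).2
    | some k0 =>
      rw [show pvLoopA parts sd (l :: ls) = some k0 by
        simp only [pvLoopA, hfk]]
      exact (pvFold_hit parts l ls sd k0 _ hfk hlpos hlpos hls).symm

theorem pvRange_pos (a : Int) : ∀ x ∈ PySem.List.pyRange a 0 (-1), 0 < x := by
  intro x hx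
  exact (PySem.List.mem_pyRange_neg_one.mp hx).1

theorem pvRange_desc (a : Int) : (PySem.List.pyRange a 0 (-1)).Pairwise (· > ·) := by
  rw [PySem.List.pyRange_neg_one_eq_reverse, List.pairwise_reverse]
  exact PySem.List.pairwise_lt_pyRange_one _ _

-- ===== VERDICT (by name: the statement is the Claim_ definition above) =====
theorem match_by_suffix_spec : Claim_equal_match_by_suffix := by
  intro name sd_keys max_suffix _
  unfold Spec_match_by_suffix match_by_suffix match_by_suffix_alt
  exact pvMain _ sd_keys _ (pvRange_pos _) (pvRange_desc _)
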